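-- pv_equiv track=rewrite | github.com/arefrazavi/rf_problem_solving | python/dynamic_programming/extremum_permutations/extremum_permutations_slow.py | extremumPermutations
-- ===== SOURCE A (Python) =====
-- from pprint import pprint
--
-- def convert_constraint_list_to_dic(constraint_list):
--     constraint_dict = {}
--     for i in constraint_list:
--         constraint_dict[i] = 1
--
--     return constraint_dict
--
-- def extremumPermutations(n, a, b):
--     a_dict = convert_constraint_list_to_dic(a)
--     b_dict = convert_constraint_list_to_dic(b)
--     # pprint(a_dict)
--     # pprint(b_dict)
--     perm_count = {1: {1: 1}}
--
--     for i in range(2, n + 1):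
--         perm_count[i] = {}
--         j = i
--         if (a_dict.get(i) and b_dict.get(i)) or (a_dict.get(i) and a_dict.get(i-1)) or (b_dict.get(i) and b_dict.get(i-1)):
--             return 0
--         while j > 0:
--             perm_count[i][j] = 0
--             if a_dict.get(i) or b_dict.get(i - 1):
--                 for k in range(j, i):
--                     perm_count[i][j] += perm_count[i - 1][k]
--             elif a_dict.get(i - 1) or b_dict.get(i):
--                 for k in range(1, j):
--                     perm_count[i][j] += perm_count[i - 1][k]
--             else:
--                 perm_count[i][j] = sum(perm_count[i - 1].values()) % 1000000007
--             j -= 1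
--         pprint(perm_count)
--
--     return sum(perm_count[n].values()) % 1000000007
-- ===== SOURCE B (Python) =====
-- def extremumPermutations(n, a, b):
--     MOD = 1000000007
--     a_set = set(a)
--     b_set = set(b)
--     row = [1]  # row[j - 1] = number of valid prefixes of length i ending at relative rank j
--     for i in range(2, n + 1):
--         if (i in a_set and i in b_set) or (i in a_set and i - 1 in a_set) \
--                 or (i in b_set and i - 1 in b_set):
--             return 0
--         prefix = [0]
--         s = 0
--         for v in row:
--             s += v
--             prefix.append(s)
--         if i in a_set or i - 1 in b_set:
--             row = [prefix[i - 1] - prefix[j - 1] for j in range(1, i + 1)]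
--         elif i - 1 in a_set or i in b_set:
--             row = [prefix[j - 1] for j in range(1, i + 1)]
--         else:
--             row = [prefix[i - 1] % MOD] * i
--     return sum(row) % MOD
-- ===== Notes on version B (the rewrite author's own statement) =====
-- stated objective: faster
-- what changed: Replace the dict-of-dicts DP whose every cell re-sums a range of the previous row (and which pretty-prints the whole table each iteration) by a single list row with one prefix-sum pass, so each cell is an O(1) difference of two prefix sums.
import Mathlib
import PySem

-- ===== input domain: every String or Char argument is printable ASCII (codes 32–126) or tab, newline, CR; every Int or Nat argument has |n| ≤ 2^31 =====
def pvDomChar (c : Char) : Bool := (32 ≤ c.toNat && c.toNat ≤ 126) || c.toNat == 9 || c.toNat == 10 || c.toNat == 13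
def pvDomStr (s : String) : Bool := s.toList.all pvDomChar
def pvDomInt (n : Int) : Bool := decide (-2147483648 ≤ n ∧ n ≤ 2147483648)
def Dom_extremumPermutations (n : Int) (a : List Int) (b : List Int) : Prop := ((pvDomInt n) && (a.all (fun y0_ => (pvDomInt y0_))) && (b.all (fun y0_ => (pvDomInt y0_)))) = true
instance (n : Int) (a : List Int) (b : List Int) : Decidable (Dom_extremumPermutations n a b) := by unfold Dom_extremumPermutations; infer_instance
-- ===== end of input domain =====

-- B replaces A's dict-of-dicts DP, whose every cell re-sums a range of the previous row,
-- by one list row with a prefix-sum pass (each cell one subtraction). A also pretty-prints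
-- its whole table each iteration; the equivalence proved here is about the return value only.


-- ===== PORT A =====

-- convert_constraint_list_to_dic: for i in constraint_list: constraint_dict[i] = 1
def pvListToDict (xs : List Int) : PySem.Dict Int Int :=
  xs.foldl (fun d i => d.insert i 1) PySem.Dict.empty

-- Python truthiness of `d.get(k)` (None is falsy, an int is truthy iff nonzero)
def pvTruthy (o : Option Int) : Bool :=
  match o with
  | some v => !(v == 0)
  | none => false

-- the `while j > 0` loop building perm_count[i] (reads row i-1 as `prev`)
def pvRowA (aD bD prev : PySem.Dict Int Int) (i : Int) : PySem.Dict Int Int :=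
  (PySem.List.pyRange i 0 (-1)).foldl (fun row j =>
    let row := row.insert j 0
    if pvTruthy (aD.get? i) || pvTruthy (bD.get? (i - 1)) then
      (PySem.List.pyRange j i 1).foldl
        (fun row k => row.insert j ((row.get? j).getD 0 + (prev.get? k).getD 0)) row
    else if pvTruthy (aD.get? (i - 1)) || pvTruthy (bD.get? i) then
      (PySem.List.pyRange 1 j 1).foldl
        (fun row k => row.insert j ((row.get? j).getD 0 + (prev.get? k).getD 0)) row
    else
      row.insert j (PySem.Int.mod prev.values.sum 1000000007)) PySem.Dict.empty

-- one iteration of `for i in range(2, n+1)`; `none` = the early `return 0` fires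
def pvStepA (aD bD : PySem.Dict Int Int) (pc : PySem.Dict Int (PySem.Dict Int Int))
    (i : Int) : Option (PySem.Dict Int (PySem.Dict Int Int)) :=
  if (pvTruthy (aD.get? i) && pvTruthy (bD.get? i))
      || (pvTruthy (aD.get? i) && pvTruthy (aD.get? (i - 1)))
      || (pvTruthy (bD.get? i) && pvTruthy (bD.get? (i - 1))) then none
  else
    some (pc.insert i (pvRowA aD bD ((pc.get? (i - 1)).getD PySem.Dict.empty) i))

-- `for i in range(2, n+1)` with the early `return 0`: stops as soon as it fires, like Python
def pvLoopA (aD bD : PySem.Dict Int Int) : Nat → Int → PySem.Dict Int (PySem.Dict Int Int)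
    → Option (PySem.Dict Int (PySem.Dict Int Int))
  | 0, _, pc => some pc
  | fuel + 1, i, pc =>
    match pvStepA aD bD pc i with
    | none => none
    | some pc' => pvLoopA aD bD fuel (i + 1) pc'

def extremumPermutations (n : Int) (a : List Int) (b : List Int) : Int :=
  let aD := pvListToDict a
  let bD := pvListToDict b
  let init : PySem.Dict Int (PySem.Dict Int Int) :=
    PySem.Dict.empty.insert 1 (PySem.Dict.empty.insert 1 1)
  match pvLoopA aD bD (n + 1 - 2).toNat 2 init with
  | none => 0
  | some pc =>
    -- perm_count[n]: the key n exists for every n admitted by Pre_ (n ≥ 1); KeyError is excluded there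
    PySem.Int.mod ((pc.get? n).getD PySem.Dict.empty).values.sum 1000000007

-- ===== PORT B =====

-- one iteration of B's loop over i; `none` = B has returned 0
def pvStepB (aS bS : List Int) (row : List Int) (i : Int) : Option (List Int) :=
  if (aS.contains i && bS.contains i) || (aS.contains i && aS.contains (i - 1))
      || (bS.contains i && bS.contains (i - 1)) then none
  else
    -- prefix = [0]; s = 0; for v in row: s += v; prefix.append(s)
    let pr := row.foldl (fun (ps : List Int × Int) v => (ps.1 ++ [ps.2 + v], ps.2 + v)) ([0], 0)
    let pfx := pr.1
    if aS.contains i || bS.contains (i - 1) then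
      some ((PySem.List.pyRange 1 (i + 1) 1).map (fun j =>
        PySem.List.pyGetD pfx (i - 1) 0 - PySem.List.pyGetD pfx (j - 1) 0))
    else if aS.contains (i - 1) || bS.contains i then
      some ((PySem.List.pyRange 1 (i + 1) 1).map (fun j => PySem.List.pyGetD pfx (j - 1) 0))
    else
      some (PySem.List.pyRepeat [PySem.Int.mod (PySem.List.pyGetD pfx (i - 1) 0) 1000000007] i)

def pvLoopB (aS bS : List Int) : Nat → Int → List Int → Option (List Int)
  | 0, _, row => some row
  | fuel + 1, i, row =>
    match pvStepB aS bS row i with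
    | none => none
    | some row' => pvLoopB aS bS fuel (i + 1) row'

def extremumPermutations_alt (n : Int) (a : List Int) (b : List Int) : Int :=
  let aS := PySem.Set.ofList a
  let bS := PySem.Set.ofList b
  match pvLoopB aS bS (n + 1 - 2).toNat 2 [1] with
  | none => 0
  | some row => PySem.Int.mod row.sum 1000000007

-- ===== PRECONDITION & SPEC =====
-- Pre_ excludes exactly n ≤ 0, where A raises KeyError (perm_count[n] was never created).
def Pre_extremumPermutations (n : Int) (a : List Int) (b : List Int) : Prop := 1 ≤ n
instance (n : Int) (a : List Int) (b : List Int) : Decidable (Pre_extremumPermutations n a b) := by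
  unfold Pre_extremumPermutations; infer_instance

def pvWitness_extremumPermutations : Int × List Int × List Int := (4, [2], [3])

def Spec_extremumPermutations (n : Int) (a : List Int) (b : List Int) (out : Int) : Prop :=
  out = extremumPermutations_alt n a b
instance (n : Int) (a : List Int) (b : List Int) (out : Int) : Decidable (Spec_extremumPermutations n a b out) := by
  unfold Spec_extremumPermutations; infer_instance

-- ===== CLAIM (what is proved, stated in full; the proofs are below) =====
def Claim_equal_extremumPermutations : Prop := ∀ (n : Int) (a : List Int) (b : List Int), Dom_extremumPermutations n a b → Pre_extremumPermutations n a b → Spec_extremumPermutations n a b (extremumPermutations n a b)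

-- ===== LEMMAS AND PROOFS =====

-- the value A's while-loop stores at key j of perm_count[i]
def pvG (aD bD prev : PySem.Dict Int Int) (i j : Int) : Int :=
  if pvTruthy (aD.get? i) || pvTruthy (bD.get? (i - 1)) then
    ((PySem.List.pyRange j i 1).map (fun k => (prev.get? k).getD 0)).sum
  else if pvTruthy (aD.get? (i - 1)) || pvTruthy (bD.get? i) then
    ((PySem.List.pyRange 1 j 1).map (fun k => (prev.get? k).getD 0)).sum
  else
    PySem.Int.mod prev.values.sum 1000000007

-- row i-1 of A's table (a dict) carries the same numbers as B's list row
def pvInvD (d : PySem.Dict Int Int) (r : List Int) (m : Int) : Prop :=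
  m = (r.length : Int)
  ∧ (∀ k : Int, 1 ≤ k → k ≤ m → d.get? k = some (r.getD (k - 1).toNat 0))
  ∧ d.values.sum = r.sum

-- membership: the constraint dict holds value 1 exactly at the members of the list
theorem pv_fold_get (xs : List Int) : ∀ (d : PySem.Dict Int Int) (i : Int),
    (xs.foldl (fun d j => d.insert j 1) d).get? i = if i ∈ xs then some 1 else d.get? i := by
  induction xs with
  | nil => intro d i; simp
  | cons x xs ih =>
    intro d i
    simp only [List.foldl_cons, ih, List.mem_cons]
    by_cases hx : i ∈ xs
    · simp [hx]
    · by_cases hix : i = x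
      · subst hix; simp [hx, PySem.Dict.get?_insert_self]
      · simp [hx, hix, PySem.Dict.get?_insert_of_ne d 1 hix]

theorem pv_truthy_mem (xs : List Int) (i : Int) :
    pvTruthy ((pvListToDict xs).get? i) = List.contains (PySem.Set.ofList xs) i := by
  unfold pvListToDict
  rw [pv_fold_get]
  by_cases h : i ∈ xs
  · simp [h, pvTruthy, List.contains_eq_mem, PySem.Set.mem_ofList]
  · simp [h, pvTruthy, List.contains_eq_mem, PySem.Set.mem_ofList, PySem.Dict.get?,
      PySem.Dict.empty]

-- the `+=` loop over range(…) accumulates one sum into key j (all other keys untouched)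
theorem pv_get_append (pre : List (Int × Int)) (j c : Int)
    (hfresh : ∀ p ∈ pre, (p.1 == j) = false) :
    (PySem.Dict.mk (pre ++ [(j, c)]) : PySem.Dict Int Int).get? j = some c := by
  have : pre.find? (fun p => p.1 == j) = none := List.find?_eq_none.mpr (by
    intro p hp; simp [hfresh p hp])
  simp [PySem.Dict.get?, List.find?_append, this]

theorem pv_ins_fresh (pre : List (Int × Int)) (j v : Int)
    (hfresh : ∀ p ∈ pre, (p.1 == j) = false) :
    (PySem.Dict.mk pre : PySem.Dict Int Int).insert j v = PySem.Dict.mk (pre ++ [(j, v)]) := by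
  have hcon : (PySem.Dict.mk pre : PySem.Dict Int Int).contains j = false := by
    simp only [PySem.Dict.contains, List.any_eq_false]
    intro p hp; simp [hfresh p hp]
  simp [PySem.Dict.insert, hcon]

theorem pv_ins_append (pre : List (Int × Int)) (j c v : Int)
    (hfresh : ∀ p ∈ pre, (p.1 == j) = false) :
    (PySem.Dict.mk (pre ++ [(j, c)]) : PySem.Dict Int Int).insert j v
      = PySem.Dict.mk (pre ++ [(j, v)]) := by
  have hcon : (PySem.Dict.mk (pre ++ [(j, c)]) : PySem.Dict Int Int).contains j = true := by
    simp [PySem.Dict.contains, List.any_append]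
  have hpre : pre.map (fun p => if p.1 = j then (j, v) else p) = pre := by
    have h1 : ∀ p ∈ pre, (if p.1 = j then (j, v) else p) = id p := by
      intro p hp
      have := hfresh p hp
      simp only [beq_eq_false_iff_ne] at this
      simp [this]
    rw [List.map_congr_left h1, List.map_id]
  simp [PySem.Dict.insert, hcon, List.map_append, hpre]

theorem pv_inner (f : Int → Int) (ks : List Int) : ∀ (pre : List (Int × Int)) (j c : Int),
    (∀ p ∈ pre, (p.1 == j) = false) →
    ks.foldl (fun row k => row.insert j ((row.get? j).getD 0 + f k))
      (PySem.Dict.mk (pre ++ [(j, c)]))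
      = PySem.Dict.mk (pre ++ [(j, c + (ks.map f).sum)]) := by
  induction ks with
  | nil => intro pre j c _; simp
  | cons k ks ih =>
    intro pre j c hfresh
    simp only [List.foldl_cons, pv_get_append pre j c hfresh, Option.getD_some,
      pv_ins_append pre j c _ hfresh]
    rw [ih pre j (c + f k) hfresh]
    congr 2
    simp [add_assoc]

-- one iteration of the while-loop appends the pair (j, pvG … j)
theorem pv_rowA_step (aD bD prev : PySem.Dict Int Int) (i j : Int) (pre : List (Int × Int))
    (hfresh : ∀ p ∈ pre, (p.1 == j) = false) :
    (let row := (PySem.Dict.mk pre : PySem.Dict Int Int).insert j 0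
     if pvTruthy (aD.get? i) || pvTruthy (bD.get? (i - 1)) then
       (PySem.List.pyRange j i 1).foldl
         (fun row k => row.insert j ((row.get? j).getD 0 + (prev.get? k).getD 0)) row
     else if pvTruthy (aD.get? (i - 1)) || pvTruthy (bD.get? i) then
       (PySem.List.pyRange 1 j 1).foldl
         (fun row k => row.insert j ((row.get? j).getD 0 + (prev.get? k).getD 0)) row
     else
       row.insert j (PySem.Int.mod prev.values.sum 1000000007))
    = PySem.Dict.mk (pre ++ [(j, pvG aD bD prev i j)]) := by
  simp only [pv_ins_fresh pre j 0 hfresh, pvG]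
  split
  · rw [pv_inner _ _ pre j 0 hfresh, zero_add]
  · split
    · rw [pv_inner _ _ pre j 0 hfresh, zero_add]
    · rw [pv_ins_append pre j 0 _ hfresh]

theorem pv_rowA_items (aD bD prev : PySem.Dict Int Int) (i : Int) :
    (pvRowA aD bD prev i).items
      = (PySem.List.pyRange i 0 (-1)).map (fun j => (j, pvG aD bD prev i j)) := by
  have hnd : (PySem.List.pyRange i 0 (-1)).Nodup := by
    rw [PySem.List.pyRange_neg_one_eq_reverse]
    exact List.nodup_reverse.mpr (PySem.List.nodup_pyRange_one _ _)
  suffices h : ∀ (js : List Int) (pre : List (Int × Int)), js.Nodup →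
      (∀ j ∈ js, ∀ p ∈ pre, (p.1 == j) = false) →
      js.foldl (fun row j =>
        let row := row.insert j 0
        if pvTruthy (aD.get? i) || pvTruthy (bD.get? (i - 1)) then
          (PySem.List.pyRange j i 1).foldl
            (fun row k => row.insert j ((row.get? j).getD 0 + (prev.get? k).getD 0)) row
        else if pvTruthy (aD.get? (i - 1)) || pvTruthy (bD.get? i) then
          (PySem.List.pyRange 1 j 1).foldl
            (fun row k => row.insert j ((row.get? j).getD 0 + (prev.get? k).getD 0)) row
        else
          row.insert j (PySem.Int.mod prev.values.sum 1000000007)) (PySem.Dict.mk pre)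
        = PySem.Dict.mk (pre ++ js.map (fun j => (j, pvG aD bD prev i j))) by
    have := h (PySem.List.pyRange i 0 (-1)) [] hnd (by intro j _ p hp; simp at hp)
    unfold pvRowA
    rw [show (PySem.Dict.empty : PySem.Dict Int Int) = PySem.Dict.mk [] from rfl, this]
    simp
  intro js
  induction js with
  | nil => intro pre _ _; simp
  | cons j js ih =>
    intro pre hnd hfresh
    rw [List.foldl_cons, pv_rowA_step aD bD prev i j pre (hfresh j (by simp))]
    rw [ih (pre ++ [(j, pvG aD bD prev i j)]) (List.nodup_cons.mp hnd).2 ?_]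
    · simp
    · intro j' hj' p hp
      rcases List.mem_append.mp hp with h | h
      · exact hfresh j' (by simp [hj']) p h
      · simp only [List.mem_singleton] at h
        subst h
        have : j ≠ j' := by
          intro he; exact (List.nodup_cons.mp hnd).1 (he ▸ hj')
        simp [this]

theorem pv_get_map (g : Int → Int) : ∀ (js : List Int) (j : Int), js.Nodup → j ∈ js →
    (PySem.Dict.mk (js.map (fun j => (j, g j))) : PySem.Dict Int Int).get? j = some (g j) := by
  intro js
  induction js with
  | nil => intro j _ h; simp at h
  | cons x js ih =>
    intro j hnd hmem
    rcases List.mem_cons.mp hmem with h | h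
    · subst h; simp [PySem.Dict.get?]
    · have hx : ¬ (x == j) = true := by
        have := (List.nodup_cons.mp hnd).1
        simp only [beq_iff_eq]
        intro he; subst he; exact this h
      have := ih j (List.nodup_cons.mp hnd).2 h
      simpa [PySem.Dict.get?, List.find?_cons, hx] using this

-- B's prefix loop computes the prefix sums of the row
theorem pv_prefix (r : List Int) :
    (r.foldl (fun (ps : List Int × Int) v => (ps.1 ++ [ps.2 + v], ps.2 + v)) ([0], 0)).1
      = (List.range (r.length + 1)).map (fun t => (r.take t).sum) := by
  suffices h : ∀ (r : List Int) (p : List Int) (s : Int),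
      r.foldl (fun (ps : List Int × Int) v => (ps.1 ++ [ps.2 + v], ps.2 + v)) (p, s)
        = (p ++ (List.range r.length).map (fun t => s + (r.take (t + 1)).sum), s + r.sum) by
    rw [h r [0] 0, List.range_succ_eq_map]
    simp [List.map_map, Function.comp_def]
  intro r
  induction r with
  | nil => intro p s; simp
  | cons v r ih =>
    intro p s
    rw [List.foldl_cons, ih (p ++ [s + v]) (s + v)]
    simp only [List.length_cons, List.range_succ_eq_map]
    simp [List.map_map, Function.comp_def, List.take_succ_cons, add_assoc]

theorem pv_pfx_get (r : List Int) (t : Int) (h0 : 0 ≤ t) (h1 : t ≤ (r.length : Int)) :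
    PySem.List.pyGetD ((List.range (r.length + 1)).map (fun t => (r.take t).sum)) t 0
      = (r.take t.toNat).sum := by
  rw [PySem.List.pyGetD_eq_getElem _ 0 h0 (by simpa using (by omega : t < ((r.length : Int) + 1)))]
  simp

-- a range sum over the row is a difference of two prefix sums
theorem pv_sum_range (r : List Int) (a : Int) : ∀ (fuel : Nat) (b : Int),
    fuel = (b - a).toNat → 1 ≤ a → a ≤ b → b ≤ (r.length : Int) + 1 →
    ((PySem.List.pyRange a b 1).map (fun k => r.getD (k - 1).toNat 0)).sum
      = (r.take (b - 1).toNat).sum - (r.take (a - 1).toNat).sum := by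
  intro fuel
  induction fuel with
  | zero =>
    intro b hf h1 h2 _
    have : b = a := by omega
    subst this
    simp [PySem.List.pyRange_one_eq_nil le_rfl]
  | succ fuel ih =>
    intro b hf h1 h2 hlen
    have hab : a < b := by omega
    have hb : b = (b - 1) + 1 := by ring
    rw [hb, PySem.List.pyRange_one_succ_right (by omega : a ≤ b - 1)]
    rw [List.map_append, List.sum_append]
    rw [ih (b - 1) (by omega) h1 (by omega) (by omega)]
    have hidx : (b - 1 - 1).toNat < r.length := by omega
    have htn : (b - 1 + 1 - 1).toNat = (b - 1 - 1).toNat + 1 := by omega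
    rw [htn, List.take_add_one]
    simp only [List.sum_append, List.map_singleton, List.sum_cons, List.sum_nil]
    have : r[(b - 1 - 1).toNat]? = some r[(b - 1 - 1).toNat] := List.getElem?_eq_getElem hidx
    rw [this]
    have : r.getD (b - 1 - 1).toNat 0 = r[(b - 1 - 1).toNat] := List.getD_eq_getElem r 0 hidx
    rw [this]
    simp
    ring

-- a row whose entries are pvG … matches A's freshly built dict row
theorem pv_invD_of (aD bD prev : PySem.Dict Int Int) (i : Int) (hi : 2 ≤ i) (newr : List Int)
    (hnewr : newr = (PySem.List.pyRange 1 (i + 1) 1).map (fun j => pvG aD bD prev i j)) :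
    pvInvD (pvRowA aD bD prev i) newr i := by
  have hitems := pv_rowA_items aD bD prev i
  have hnd : (PySem.List.pyRange i 0 (-1)).Nodup := by
    rw [PySem.List.pyRange_neg_one_eq_reverse]
    exact List.nodup_reverse.mpr (PySem.List.nodup_pyRange_one _ _)
  refine ⟨?_, ?_, ?_⟩
  · subst hnewr
    simp only [List.length_map, PySem.List.length_pyRange_one]
    omega
  · intro k hk1 hk2
    have hgk : (pvRowA aD bD prev i).get? k = some (pvG aD bD prev i k) := by
      have heq : (pvRowA aD bD prev i).get? k
          = (PySem.Dict.mk ((PySem.List.pyRange i 0 (-1)).map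
              (fun j => (j, pvG aD bD prev i j))) : PySem.Dict Int Int).get? k := by
        simp [PySem.Dict.get?, hitems]
      rw [heq]
      exact pv_get_map _ _ _ hnd (PySem.List.mem_pyRange_neg_one.mpr ⟨by omega, hk2⟩)
    rw [hgk]
    subst hnewr
    have hlt : (k - 1).toNat < ((PySem.List.pyRange 1 (i + 1) 1).map
        (fun j => pvG aD bD prev i j)).length := by
      simp only [List.length_map, PySem.List.length_pyRange_one]; omega
    rw [List.getD_eq_getElem _ 0 hlt, List.getElem_map, PySem.List.getElem_pyRange_one]
    congr 2
    omega
  · have hvals : (pvRowA aD bD prev i).values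
        = (PySem.List.pyRange i 0 (-1)).map (fun j => pvG aD bD prev i j) := by
      simp [PySem.Dict.values, hitems, List.map_map, Function.comp_def]
    rw [hvals, hnewr]
    have : PySem.List.pyRange i 0 (-1) = (PySem.List.pyRange 1 (i + 1) 1).reverse := by
      rw [PySem.List.pyRange_neg_one_eq_reverse]
      norm_num
    rw [this, List.map_reverse, List.sum_reverse]

-- the two loop bodies preserve the row correspondence
theorem pv_step (a b r : List Int) (i : Int) (prev : PySem.Dict Int Int)
    (hi : 2 ≤ i) (hinv : pvInvD prev r (i - 1))
    (hc : ¬ ((List.contains (PySem.Set.ofList a) i && List.contains (PySem.Set.ofList b) i)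
        || (List.contains (PySem.Set.ofList a) i && List.contains (PySem.Set.ofList a) (i - 1))
        || (List.contains (PySem.Set.ofList b) i && List.contains (PySem.Set.ofList b) (i - 1))) = true) :
    ∃ r', pvStepB (PySem.Set.ofList a) (PySem.Set.ofList b) r i = some r'
      ∧ pvInvD (pvRowA (pvListToDict a) (pvListToDict b) prev i) r' i := by
  obtain ⟨hlen, hget, hsum⟩ := hinv
  have hpget : ∀ t : Int, 0 ≤ t → t ≤ (r.length : Int) →
      PySem.List.pyGetD
        (r.foldl (fun (ps : List Int × Int) v => (ps.1 ++ [ps.2 + v], ps.2 + v)) ([0], 0)).1 t 0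
        = (r.take t.toNat).sum := by
    intro t h0 h1
    rw [pv_prefix r]
    exact pv_pfx_get r t h0 h1
  have hmapf : ∀ (lo hi' : Int), 1 ≤ lo → hi' ≤ i →
      (PySem.List.pyRange lo hi' 1).map (fun k => (prev.get? k).getD 0)
        = (PySem.List.pyRange lo hi' 1).map (fun k => r.getD (k - 1).toNat 0) := by
    intro lo hi' hlo hhi
    apply List.map_congr_left
    intro k hk
    rw [PySem.List.mem_pyRange_one] at hk
    rw [hget k (by omega) (by omega)]
    rfl
  by_cases hc1 : (List.contains (PySem.Set.ofList a) i || List.contains (PySem.Set.ofList b) (i - 1)) = true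
  · have hB : pvStepB (PySem.Set.ofList a) (PySem.Set.ofList b) r i
        = some ((PySem.List.pyRange 1 (i + 1) 1).map (fun j =>
            PySem.List.pyGetD
              (r.foldl (fun (ps : List Int × Int) v => (ps.1 ++ [ps.2 + v], ps.2 + v)) ([0], 0)).1
              (i - 1) 0
            - PySem.List.pyGetD
              (r.foldl (fun (ps : List Int × Int) v => (ps.1 ++ [ps.2 + v], ps.2 + v)) ([0], 0)).1
              (j - 1) 0)) := by
      simp only [pvStepB]
      rw [if_neg hc, if_pos hc1]
    have hmap : (PySem.List.pyRange 1 (i + 1) 1).map (fun j =>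
            PySem.List.pyGetD
              (r.foldl (fun (ps : List Int × Int) v => (ps.1 ++ [ps.2 + v], ps.2 + v)) ([0], 0)).1
              (i - 1) 0
            - PySem.List.pyGetD
              (r.foldl (fun (ps : List Int × Int) v => (ps.1 ++ [ps.2 + v], ps.2 + v)) ([0], 0)).1
              (j - 1) 0)
        = (PySem.List.pyRange 1 (i + 1) 1).map (fun j => pvG (pvListToDict a) (pvListToDict b) prev i j) := by
      apply List.map_congr_left
      intro j hj
      rw [PySem.List.mem_pyRange_one] at hj
      rw [hpget (i - 1) (by omega) (by omega), hpget (j - 1) (by omega) (by omega)]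
      unfold pvG
      rw [pv_truthy_mem, pv_truthy_mem, if_pos hc1]
      rw [hmapf j i (by omega) le_rfl]
      rw [pv_sum_range r j (i - j).toNat i rfl (by omega) (by omega) (by omega)]
    exact ⟨_, hB, pv_invD_of _ _ prev i hi _ hmap⟩
  · by_cases hc2 : (List.contains (PySem.Set.ofList a) (i - 1) || List.contains (PySem.Set.ofList b) i) = true
    · have hB : pvStepB (PySem.Set.ofList a) (PySem.Set.ofList b) r i
          = some ((PySem.List.pyRange 1 (i + 1) 1).map (fun j =>
              PySem.List.pyGetD
                (r.foldl (fun (ps : List Int × Int) v => (ps.1 ++ [ps.2 + v], ps.2 + v)) ([0], 0)).1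
                (j - 1) 0)) := by
        simp only [pvStepB]
        rw [if_neg hc, if_neg hc1, if_pos hc2]
      have hmap : (PySem.List.pyRange 1 (i + 1) 1).map (fun j =>
              PySem.List.pyGetD
                (r.foldl (fun (ps : List Int × Int) v => (ps.1 ++ [ps.2 + v], ps.2 + v)) ([0], 0)).1
                (j - 1) 0)
          = (PySem.List.pyRange 1 (i + 1) 1).map (fun j => pvG (pvListToDict a) (pvListToDict b) prev i j) := by
        apply List.map_congr_left
        intro j hj
        rw [PySem.List.mem_pyRange_one] at hj
        rw [hpget (j - 1) (by omega) (by omega)]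
        unfold pvG
        rw [pv_truthy_mem, pv_truthy_mem, if_neg hc1]
        rw [pv_truthy_mem, pv_truthy_mem, if_pos hc2]
        rw [hmapf 1 j le_rfl (by omega)]
        rw [pv_sum_range r 1 (j - 1).toNat j rfl le_rfl (by omega) (by omega)]
        simp
      exact ⟨_, hB, pv_invD_of _ _ prev i hi _ hmap⟩
    · have hB : pvStepB (PySem.Set.ofList a) (PySem.Set.ofList b) r i
          = some (PySem.List.pyRepeat [PySem.Int.mod
              (PySem.List.pyGetD
                (r.foldl (fun (ps : List Int × Int) v => (ps.1 ++ [ps.2 + v], ps.2 + v)) ([0], 0)).1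
                (i - 1) 0) 1000000007] i) := by
        simp only [pvStepB]
        rw [if_neg hc, if_neg hc1, if_neg hc2]
      have hx : PySem.List.pyGetD
          (r.foldl (fun (ps : List Int × Int) v => (ps.1 ++ [ps.2 + v], ps.2 + v)) ([0], 0)).1
          (i - 1) 0 = r.sum := by
        rw [hpget (i - 1) (by omega) (by omega)]
        rw [show (i - 1).toNat = r.length from by omega, List.take_length]
      have hmap : PySem.List.pyRepeat [PySem.Int.mod
            (PySem.List.pyGetD
              (r.foldl (fun (ps : List Int × Int) v => (ps.1 ++ [ps.2 + v], ps.2 + v)) ([0], 0)).1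
              (i - 1) 0) 1000000007] i
          = (PySem.List.pyRange 1 (i + 1) 1).map (fun j => pvG (pvListToDict a) (pvListToDict b) prev i j) := by
        rw [hx, PySem.List.pyRepeat_singleton]
        have hpt : ∀ j ∈ PySem.List.pyRange 1 (i + 1) 1,
            pvG (pvListToDict a) (pvListToDict b) prev i j
              = PySem.Int.mod r.sum 1000000007 := by
          intro j _
          unfold pvG
          rw [pv_truthy_mem, pv_truthy_mem, if_neg hc1]
          rw [pv_truthy_mem, pv_truthy_mem, if_neg hc2]
          rw [hsum]
        rw [List.map_congr_left hpt, List.map_const']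
        rw [PySem.List.length_pyRange_one]
        congr 1
        omega
      exact ⟨_, hB, pv_invD_of _ _ prev i hi _ hmap⟩

-- main loop invariant, by induction on the number of remaining iterations
theorem pv_outer (a b : List Int) (n : Int) : ∀ (fuel : Nat) (m : Int)
    (pc : PySem.Dict Int (PySem.Dict Int Int)) (d : PySem.Dict Int Int) (r : List Int),
    1 ≤ m → m ≤ n → fuel = (n - m).toNat → pc.get? m = some d → pvInvD d r m →
    ((pvLoopA (pvListToDict a) (pvListToDict b) fuel (m + 1) pc = none
       ∧ pvLoopB (PySem.Set.ofList a) (PySem.Set.ofList b) fuel (m + 1) r = none)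
     ∨ (∃ pc' d' r',
         pvLoopA (pvListToDict a) (pvListToDict b) fuel (m + 1) pc = some pc'
         ∧ pvLoopB (PySem.Set.ofList a) (PySem.Set.ofList b) fuel (m + 1) r = some r'
         ∧ pc'.get? n = some d' ∧ pvInvD d' r' n)) := by
  intro fuel
  induction fuel with
  | zero =>
    intro m pc d r h1 h2 hf hpc hinv
    have hmn : m = n := by omega
    subst hmn
    exact Or.inr ⟨pc, d, r, rfl, rfl, hpc, hinv⟩
  | succ fuel ih =>
    intro m pc d r h1 h2 hf hpc hinv
    have hmn : m < n := by omega
    by_cases hc : ((List.contains (PySem.Set.ofList a) (m + 1) && List.contains (PySem.Set.ofList b) (m + 1))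
        || (List.contains (PySem.Set.ofList a) (m + 1) && List.contains (PySem.Set.ofList a) (m + 1 - 1))
        || (List.contains (PySem.Set.ofList b) (m + 1) && List.contains (PySem.Set.ofList b) (m + 1 - 1))) = true
    · have hA : pvStepA (pvListToDict a) (pvListToDict b) pc (m + 1) = none := by
        simp only [pvStepA, pv_truthy_mem]
        rw [if_pos hc]
      have hB : pvStepB (PySem.Set.ofList a) (PySem.Set.ofList b) r (m + 1) = none := by
        simp only [pvStepB]
        rw [if_pos hc]
      rw [pvLoopA, pvLoopB, hA, hB]
      exact Or.inl ⟨rfl, rfl⟩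
    · obtain ⟨r', hB, hinv'⟩ := pv_step a b r (m + 1) d (by omega)
        (by rw [show m + 1 - 1 = m from by ring]; exact hinv) hc
      have hA : pvStepA (pvListToDict a) (pvListToDict b) pc (m + 1)
          = some (pc.insert (m + 1) (pvRowA (pvListToDict a) (pvListToDict b) d (m + 1))) := by
        simp only [pvStepA, pv_truthy_mem]
        rw [if_neg hc, show m + 1 - 1 = m from by ring, hpc]
        rfl
      rw [pvLoopA, pvLoopB, hA, hB]
      exact ih (m + 1) _ (pvRowA (pvListToDict a) (pvListToDict b) d (m + 1)) r'
        (by omega) (by omega) (by omega) (PySem.Dict.get?_insert_self _ _ _) hinv'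

-- ===== VERDICT (by name: the statement is the Claim_ definition above) =====
theorem extremumPermutations_spec : Claim_equal_extremumPermutations := by
  intro n a b _ hpre
  unfold Spec_extremumPermutations extremumPermutations extremumPermutations_alt
  unfold Pre_extremumPermutations at hpre
  have hinit : (PySem.Dict.empty.insert 1 (PySem.Dict.empty.insert 1 1)
      : PySem.Dict Int (PySem.Dict Int Int)).get? 1
      = some (PySem.Dict.empty.insert 1 1) := by decide
  have hinv : pvInvD (PySem.Dict.empty.insert 1 1) [1] 1 := by
    refine ⟨by decide, ?_, by decide⟩
    intro k hk1 hk2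
    have : k = 1 := by omega
    subst this; decide
  have h := pv_outer a b n (n - 1).toNat 1
    (PySem.Dict.empty.insert 1 (PySem.Dict.empty.insert 1 1))
    (PySem.Dict.empty.insert 1 1) [1] le_rfl hpre rfl hinit hinv
  rw [show ((1 : Int) + 1) = 2 from by norm_num] at h
  rw [show ((n : Int) + 1 - 2) = n - 1 from by ring]
  rcases h with ⟨hA, hB⟩ | ⟨pc', d', r', hA, hB, hget, hlen, _, hsum⟩
  · simp only [hA, hB]
  · simp only [hA, hB, hget, Option.getD_some, hsum]
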